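-- pv_equiv track=rewrite | github.com/principia-cloud/principia-cli | servers/scene-gen/utils.py | clean_json_comments
-- ===== SOURCE A (Python) =====
-- def clean_json_comments(json_str: str) -> str:
--     """
--     Remove C-style comments (// and /* */ comment text) from a JSON string while preserving
--     any comment markers that appear inside string values.
--
--     Args:
--         json_str: JSON string that may contain C-style comments
--
--     Returns:
--         Cleaned JSON string without comments
--     """
--     # Track if we're inside a string value or block comment
--     in_string = False
--     in_block_comment = False
--     escape_next = False
--     result = []
--     i = 0
--
--     while i < len(json_str):
--         char = json_str[i]
--
--         if escape_next:
--             # Character is escaped, add it and continue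
--             result.append(char)
--             escape_next = False
--             i += 1
--         elif char == '\\' and in_string:
--             # Escape character found inside string
--             result.append(char)
--             escape_next = True
--             i += 1
--         elif char == '"' and not in_block_comment:
--             # Toggle string state
--             in_string = not in_string
--             result.append(char)
--             i += 1
--         elif not in_string and not in_block_comment and char == '/' and i + 1 < len(json_str):
--             # Check for start of comment
--             next_char = json_str[i + 1]
--             if next_char == '/':
--                 # Line comment - skip until end of line
--                 i += 2
--                 while i < len(json_str) and json_str[i] != '\n':
--                     i += 1
--                 # Don't skip the newline itself
--             elif next_char == '*':
--                 # Block comment - skip until */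
--                 in_block_comment = True
--                 i += 2
--             else:
--                 result.append(char)
--                 i += 1
--         elif in_block_comment and char == '*' and i + 1 < len(json_str) and json_str[i + 1] == '/':
--             # End of block comment
--             in_block_comment = False
--             i += 2
--         elif in_block_comment:
--             # Inside block comment, skip character
--             i += 1
--         else:
--             # Normal character
--             result.append(char)
--             i += 1
--
--     # Join result and clean up empty lines
--     result_str = ''.join(result)
--     lines = result_str.split('\n')
--     cleaned_lines = []
--     for line in lines:
--         line = line.rstrip()
--         if line:  # Only add non-empty lines
--             cleaned_lines.append(line)
--
--     return '\n'.join(cleaned_lines)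
-- ===== SOURCE B (Python) =====
-- def clean_json_comments(json_str: str) -> str:
--     """Token-jumping scanner: consume whole string literals and whole comments
--     at once instead of a per-character state machine."""
--     n = len(json_str)
--     out = []
--     i = 0
--     while i < n:
--         c = json_str[i]
--         if c == '"':
--             # consume a complete string literal (escapes kept verbatim)
--             j = i + 1
--             while j < n:
--                 if json_str[j] == '\\':
--                     j += 2
--                 elif json_str[j] == '"':
--                     j += 1
--                     break
--                 else:
--                     j += 1
--             out.append(json_str[i:j])
--             i = j
--         elif c == '/' and i + 1 < n and json_str[i + 1] == '/':
--             k = json_str.find('\n', i + 2)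
--             i = n if k == -1 else k  # keep the newline itself
--         elif c == '/' and i + 1 < n and json_str[i + 1] == '*':
--             k = json_str.find('*/', i + 2)
--             i = n if k == -1 else k + 2
--         else:
--             out.append(c)
--             i += 1
--     lines = ''.join(out).split('\n')
--     return '\n'.join(ln for ln in (l.rstrip() for l in lines) if ln)
-- ===== Notes on version B (the rewrite author's own statement) =====
-- stated objective: alternative
-- what changed: Replaced A's per-character scanner with three persistent state flags (in_string, in_block_comment, escape_next) by a stateless token-jumping scanner that consumes a whole string literal, a whole line comment or a whole block comment in one jump using str.find; the shared split/rstrip/drop-empty/join tail is unchanged.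
import Mathlib
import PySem

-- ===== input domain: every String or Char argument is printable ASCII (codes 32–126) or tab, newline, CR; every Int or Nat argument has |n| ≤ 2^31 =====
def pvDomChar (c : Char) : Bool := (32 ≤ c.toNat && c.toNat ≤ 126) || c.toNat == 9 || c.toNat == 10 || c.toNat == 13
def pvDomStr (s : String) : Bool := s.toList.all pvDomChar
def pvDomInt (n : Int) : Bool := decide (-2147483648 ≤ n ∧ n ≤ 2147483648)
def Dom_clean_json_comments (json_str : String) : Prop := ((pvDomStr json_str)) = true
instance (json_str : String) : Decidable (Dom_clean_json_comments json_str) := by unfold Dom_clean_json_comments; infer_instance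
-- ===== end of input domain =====

-- B replaces A's per-character three-flag state machine with a token-jumping scanner that
-- consumes whole string literals and whole comments at once (objective: alternative).

-- shared tail, identical in both Pythons: split('\n'), rstrip each line, drop empty, join('\n')
def pvCleanupLines (cs : List Char) : String :=
  String.ofList (PySem.Chars.join ['\n']
    (((PySem.Chars.splitOn cs ['\n']).map PySem.Chars.rstrip).filter (fun l => !l.isEmpty)))

-- ===== PORT A =====
-- inner while of the line-comment branch: advance i until json_str[i] == '\n' (newline kept)
def pvSkipLineA : List Char → List Char
  | [] => []
  | c :: rest => if c = '\n' then c :: rest else pvSkipLineA rest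

theorem pvSkipLineA_length_le : ∀ l : List Char, (pvSkipLineA l).length ≤ l.length
  | [] => le_refl _
  | c :: rest => by
      unfold pvSkipLineA
      split
      · exact le_refl _
      · exact Nat.le_succ_of_le (pvSkipLineA_length_le rest)

-- A's main while loop: state (in_string, in_block_comment, escape_next), result built up front
def pvLoopA : List Char → Bool → Bool → Bool → List Char
  | [], _, _, _ => []
  | c :: rest, inS, inB, esc =>
    if esc then c :: pvLoopA rest inS inB false
    else if c = '\\' ∧ inS = true then c :: pvLoopA rest inS inB true
    else if c = '"' ∧ inB = false then c :: pvLoopA rest (!inS) inB esc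
    else if inS = false ∧ inB = false ∧ c = '/' ∧ rest ≠ [] then
      match rest with
      | [] => []   -- unreachable (rest ≠ [])
      | n :: rest2 =>
        if n = '/' then pvLoopA (pvSkipLineA rest2) inS inB esc
        else if n = '*' then pvLoopA rest2 inS true esc
        else c :: pvLoopA (n :: rest2) inS inB esc
    else if inB = true ∧ c = '*' ∧ rest.head? = some '/' then pvLoopA rest.tail inS false esc
    else if inB then pvLoopA rest inS inB esc
    else c :: pvLoopA rest inS inB esc
termination_by l => l.length
decreasing_by
  all_goals simp
  have := pvSkipLineA_length_le rest2; omega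

def clean_json_comments (json_str : String) : String :=
  pvCleanupLines (pvLoopA json_str.toList false false false)

-- ===== PORT B =====
-- B's inner string-literal loop: after the opening quote, take chars (escape pairs whole)
-- up to and including the closing quote; returns (taken, remaining)
def pvTakeStrB : List Char → List Char × List Char
  | [] => ([], [])
  | c :: rest =>
    if c = '\\' then
      match rest with
      | [] => ([c], [])
      | d :: rest2 => let p := pvTakeStrB rest2; (c :: d :: p.1, p.2)
    else if c = '"' then ([c], rest)
    else let p := pvTakeStrB rest; (c :: p.1, p.2)

theorem pvTakeStrB_length_le : ∀ l : List Char, (pvTakeStrB l).2.length ≤ l.length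
  | [] => le_refl _
  | c :: rest => by
      unfold pvTakeStrB
      split
      · cases rest with
        | nil => simp
        | cons d rest2 =>
            simpa using Nat.le_succ_of_le (Nat.le_succ_of_le (pvTakeStrB_length_le rest2))
      · split
        · simp
        · exact Nat.le_succ_of_le (pvTakeStrB_length_le rest)

-- json_str.find('*/', i+2): drop everything up to and including the first "*/"
def pvDropBlockB : List Char → List Char
  | [] => []
  | c :: rest => if c = '*' ∧ rest.head? = some '/' then rest.tail else pvDropBlockB rest

theorem pvDropBlockB_length_le : ∀ l : List Char, (pvDropBlockB l).length ≤ l.length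
  | [] => le_refl _
  | c :: rest => by
      unfold pvDropBlockB
      split
      · cases rest with
        | nil => simp
        | cons a t => simp [List.tail]; omega
      · exact Nat.le_succ_of_le (pvDropBlockB_length_le rest)

-- B's main jumping loop (no persistent state)
def pvLoopB : List Char → List Char
  | [] => []
  | c :: rest =>
    if c = '"' then
      let p := pvTakeStrB rest
      c :: (p.1 ++ pvLoopB p.2)
    else if c = '/' ∧ rest.head? = some '/' then
      -- find('\n', i+2) then jump there (newline kept); -1 jumps to the end
      pvLoopB (rest.tail.dropWhile (fun x => x ≠ '\n'))
    else if c = '/' ∧ rest.head? = some '*' then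
      pvLoopB (pvDropBlockB rest.tail)
    else c :: pvLoopB rest
termination_by l => l.length
decreasing_by
  all_goals simp
  · have := pvTakeStrB_length_le rest; omega
  · have h1 := List.length_dropWhile_le (fun x => !decide (x = '\n')) rest.tail
    have h2 : rest.tail.length ≤ rest.length := by cases rest <;> simp
    omega
  · have h1 := pvDropBlockB_length_le rest.tail
    have h2 : rest.tail.length ≤ rest.length := by cases rest <;> simp
    omega

def clean_json_comments_alt (json_str : String) : String :=
  pvCleanupLines (pvLoopB json_str.toList)

-- ===== PRECONDITION & SPEC =====
def Spec_clean_json_comments (json_str : String) (out : String) : Prop := out = clean_json_comments_alt json_str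
instance (json_str : String) (out : String) : Decidable (Spec_clean_json_comments json_str out) := by unfold Spec_clean_json_comments; infer_instance

-- ===== CLAIM (what is proved, stated in full; the proofs are below) =====
def Claim_equal_clean_json_comments : Prop := ∀ (json_str : String), Dom_clean_json_comments json_str → Spec_clean_json_comments json_str (clean_json_comments json_str)

-- ===== LEMMAS AND PROOFS =====

theorem loopA_nil (inS inB esc : Bool) : pvLoopA [] inS inB esc = [] := by
  rw [pvLoopA.eq_def]

-- A in the in-string state copies exactly what pvTakeStrB takes
theorem loopA_string : ∀ l : List Char,
    pvLoopA l true false false = (pvTakeStrB l).1 ++ pvLoopA (pvTakeStrB l).2 false false false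
  | [] => by simp [loopA_nil, pvTakeStrB]
  | c :: rest => by
      by_cases hb : c = '\\'
      · cases rest with
        | nil =>
            rw [pvLoopA.eq_def]; simp [hb]
            rw [pvLoopA.eq_def]; rw [pvTakeStrB.eq_def]; simp [loopA_nil]
        | cons d rest2 =>
            have ih := loopA_string rest2
            rw [pvLoopA.eq_def]; simp [hb]
            rw [pvLoopA.eq_def]; rw [pvTakeStrB.eq_def]; simp [ih]
      · by_cases hq : c = '"'
        · rw [pvLoopA.eq_def]; rw [pvTakeStrB.eq_def]; simp [hq]
        · have ih := loopA_string rest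
          rw [pvLoopA.eq_def]; rw [pvTakeStrB.eq_def]; simp [hb, hq, ih]
termination_by l => l.length
decreasing_by all_goals simp

-- A in the in-block-comment state skips exactly what pvDropBlockB drops
theorem loopA_block : ∀ l : List Char,
    pvLoopA l false true false = pvLoopA (pvDropBlockB l) false false false
  | [] => by simp [loopA_nil, pvDropBlockB]
  | c :: rest => by
      by_cases hs : c = '*' ∧ rest.head? = some '/'
      · rw [pvLoopA.eq_def]; rw [pvDropBlockB.eq_def]; simp [hs]
      · have ih := loopA_block rest
        rw [pvLoopA.eq_def]; rw [pvDropBlockB.eq_def]; simp [hs, ih]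

theorem skipLineA_eq_dropWhile : ∀ l : List Char,
    pvSkipLineA l = l.dropWhile (fun x => x ≠ '\n')
  | [] => rfl
  | c :: rest => by
      by_cases h : c = '\n'
      · simp [pvSkipLineA, h]
      · rw [pvSkipLineA.eq_def]
        simp [h, skipLineA_eq_dropWhile rest]

theorem loopA_eq_loopB : ∀ l : List Char, pvLoopA l false false false = pvLoopB l
  | [] => by rw [pvLoopA.eq_def, pvLoopB.eq_def]
  | c :: rest => by
      have hBnil : pvLoopB [] = [] := by rw [pvLoopB.eq_def]
      by_cases hq : c = '"'
      · -- string literal: A toggles into the in-string state, B consumes the token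
        have hlen := pvTakeStrB_length_le rest
        have ih := loopA_eq_loopB (pvTakeStrB rest).2
        rw [pvLoopA.eq_def, pvLoopB.eq_def]
        simp [hq, loopA_string rest, ih]
      · by_cases hsl : c = '/'
        · cases rest with
          | nil =>
              rw [pvLoopA.eq_def, pvLoopB.eq_def]
              simp [hq, hsl, loopA_nil, hBnil]
          | cons n rest2 =>
              by_cases h2 : n = '/'
              · -- line comment
                have hlen := List.length_dropWhile_le (fun x => !decide (x = '\n')) rest2
                have ih := loopA_eq_loopB (rest2.dropWhile (fun x => !decide (x = '\n')))
                rw [pvLoopA.eq_def, pvLoopB.eq_def]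
                simp [hq, hsl, h2, skipLineA_eq_dropWhile rest2, ih]
              · by_cases h3 : n = '*'
                · -- block comment
                  have hlen := pvDropBlockB_length_le rest2
                  have ih := loopA_eq_loopB (pvDropBlockB rest2)
                  rw [pvLoopA.eq_def, pvLoopB.eq_def]
                  simp [hq, hsl, h2, h3, loopA_block rest2, ih]
                · have ih := loopA_eq_loopB (n :: rest2)
                  rw [pvLoopA.eq_def, pvLoopB.eq_def]
                  simp [hq, hsl, h2, h3, ih]
        · have ih := loopA_eq_loopB rest
          rw [pvLoopA.eq_def, pvLoopB.eq_def]
          simp [hq, hsl, ih]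
termination_by l => l.length
decreasing_by
  all_goals simp_all
  all_goals omega

-- ===== VERDICT (by name: the statement is the Claim_ definition above) =====
theorem clean_json_comments_spec : Claim_equal_clean_json_comments := by
  intro s _
  unfold Spec_clean_json_comments clean_json_comments clean_json_comments_alt
  rw [loopA_eq_loopB]
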